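-- pv_equiv track=rewrite | github.com/AntoineBRTL/Yams | engine/entities/Dice.py | hasValuesFrequency
-- ===== SOURCE A (Python) =====
-- def hasValuesFrequency(dicesValue : list, frequency : int):
--     """
--     This method checks if the dices value given contain the same dices
--     """
--
--     numberOfSameDices = 1
--
--     for i in range(len(dicesValue)):
--
--         numberOfSameDices = 1
--
--         for j in range(len(dicesValue)):
--             if(i != j):
--                 if(dicesValue[i] == dicesValue[j]):
--                     numberOfSameDices += 1
--
--         if(numberOfSameDices == frequency):
--             return True
--     return False
-- ===== SOURCE B (Python) =====
-- def hasValuesFrequency(dicesValue: list, frequency: int):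
--     counts = {}
--     for v in dicesValue:
--         counts[v] = counts.get(v, 0) + 1
--     for c in counts.values():
--         if c == frequency:
--             return True
--     return False
-- ===== Notes on version B (the rewrite author's own statement) =====
-- stated objective: faster
-- what changed: Replaced the O(n^2) nested index rescan with a single counting-dict pass followed by a scan of the distinct counts.
import Mathlib
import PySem

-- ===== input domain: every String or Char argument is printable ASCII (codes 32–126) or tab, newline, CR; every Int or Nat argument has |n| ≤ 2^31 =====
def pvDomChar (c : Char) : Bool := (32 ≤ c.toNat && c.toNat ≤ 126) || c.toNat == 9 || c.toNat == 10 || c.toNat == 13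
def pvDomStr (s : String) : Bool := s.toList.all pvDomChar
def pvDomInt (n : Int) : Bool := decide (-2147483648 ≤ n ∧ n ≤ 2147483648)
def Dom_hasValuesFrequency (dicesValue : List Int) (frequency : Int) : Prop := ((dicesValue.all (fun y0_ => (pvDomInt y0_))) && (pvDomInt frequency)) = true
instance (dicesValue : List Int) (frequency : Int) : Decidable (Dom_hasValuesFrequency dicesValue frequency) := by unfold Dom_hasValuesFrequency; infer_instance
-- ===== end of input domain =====

-- ===== PORT A =====
-- literal port of A: for each index i, rescan all j ≠ i counting equal values, return True early if the count equals frequency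
def hasValuesFrequency (dicesValue : List Int) (frequency : Int) : Bool :=
  (PySem.List.pyRange 0 (dicesValue.length : Int) 1).any (fun i =>
    ((PySem.List.pyRange 0 (dicesValue.length : Int) 1).foldl (fun acc j =>
        if i ≠ j then
          (if PySem.List.pyGetD dicesValue i 0 == PySem.List.pyGetD dicesValue j 0 then acc + 1 else acc)
        else acc) (1 : Int)) == frequency)

-- ===== PORT B =====
-- port of B: one counting pass building a dict, then scan its values
def hasValuesFrequency_alt (dicesValue : List Int) (frequency : Int) : Bool :=
  let counts := dicesValue.foldl (fun d v => d.insert v (d.getD v 0 + 1)) (PySem.Dict.mk [])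
  counts.values.any (fun c => c == frequency)

-- ===== PRECONDITION & SPEC =====
def Spec_hasValuesFrequency (dicesValue : List Int) (frequency : Int) (out : Bool) : Prop := out = hasValuesFrequency_alt dicesValue frequency
instance (dicesValue : List Int) (frequency : Int) (out : Bool) : Decidable (Spec_hasValuesFrequency dicesValue frequency out) := by unfold Spec_hasValuesFrequency; infer_instance

-- ===== CLAIM (what is proved, stated in full; the proofs are below) =====
def Claim_equal_hasValuesFrequency : Prop := ∀ (dicesValue : List Int) (frequency : Int), Dom_hasValuesFrequency dicesValue frequency → Spec_hasValuesFrequency dicesValue frequency (hasValuesFrequency dicesValue frequency)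

-- ===== LEMMAS AND PROOFS =====

-- Int equality test is symmetric
lemma beq_comm_int (a b : Int) : (a == b) = (b == a) := by
  rw [Bool.eq_iff_iff, beq_iff_eq, beq_iff_eq]; exact eq_comm

-- A's inner rescan at a valid index i computes the full multiplicity of dicesValue[i]
lemma inner_eq_count (xs : List Int) (i : Int) (h0 : 0 ≤ i) (h1 : i < (xs.length : Int)) :
    ((PySem.List.pyRange 0 (xs.length : Int) 1).foldl (fun acc j =>
        if i ≠ j then
          (if PySem.List.pyGetD xs i 0 == PySem.List.pyGetD xs j 0 then acc + 1 else acc)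
        else acc) (1 : Int)) = (xs.count (PySem.List.pyGetD xs i 0) : Int) := by
  have hf : (fun (acc : Int) (j : Int) =>
        if i ≠ j then
          (if PySem.List.pyGetD xs i 0 == PySem.List.pyGetD xs j 0 then acc + 1 else acc)
        else acc)
      = (fun (acc : Int) (j : Int) =>
        if i ≠ j ∧ PySem.List.pyGetD xs i 0 == PySem.List.pyGetD xs j 0 then acc + 1 else acc) := by
    funext acc j
    split_ifs <;> tauto
  rw [hf, PySem.List.foldl_ite_add_one
    (fun j => i ≠ j ∧ PySem.List.pyGetD xs i 0 == PySem.List.pyGetD xs j 0)]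
  have hm : (PySem.List.pyRange 0 (xs.length : Int) 1).map
      (fun j => PySem.List.pyGetD xs j 0) = xs := by
    have h := PySem.List.map_pyGetD_pyRange_zero xs 0
    simpa [PySem.List.len] using h
  -- the unrestricted count over the range is the multiplicity in xs
  have hcnt0 : ∀ v : Int, (PySem.List.pyRange 0 (xs.length : Int) 1).countP
      (fun j => v == PySem.List.pyGetD xs j 0) = xs.count v := by
    intro v
    conv_rhs => rw [← hm]
    rw [List.count, List.countP_map]
    apply List.countP_congr
    intro j _
    rw [Function.comp_apply, beq_comm_int]
  have hcnt := hcnt0 (PySem.List.pyGetD xs i 0)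
  have hsplit : PySem.List.pyRange 0 (xs.length : Int) 1
      = PySem.List.pyRange 0 i 1 ++ (i :: PySem.List.pyRange (i+1) (xs.length : Int) 1) := by
    rw [PySem.List.pyRange_one_append 0 i (xs.length : Int) h0 (le_of_lt h1),
        PySem.List.pyRange_one_cons h1]
  have hq : ∀ (L : List Int), (∀ j ∈ L, j ≠ i) →
      L.countP (fun j => decide (i ≠ j ∧ PySem.List.pyGetD xs i 0 == PySem.List.pyGetD xs j 0))
      = L.countP (fun j => PySem.List.pyGetD xs i 0 == PySem.List.pyGetD xs j 0) := by
    intro L hL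
    apply List.countP_congr
    intro j hj
    have hij : i ≠ j := fun h => hL j hj h.symm
    simp [hij]
  rw [hsplit] at hcnt ⊢
  rw [List.countP_append, List.countP_cons] at hcnt ⊢
  rw [hq _ (fun j hj => by have := (PySem.List.mem_pyRange_one.mp hj).2; omega),
      hq _ (fun j hj => by have := (PySem.List.mem_pyRange_one.mp hj).1; omega)]
  have e3 : (decide (i ≠ i ∧ PySem.List.pyGetD xs i 0 == PySem.List.pyGetD xs i 0)) = false := by
    simp
  have e4 : (PySem.List.pyGetD xs i 0 == PySem.List.pyGetD xs i 0) = true := by simp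
  rw [e3]
  rw [e4] at hcnt
  simp only [if_true, if_false, Bool.false_eq_true] at hcnt ⊢
  omega

-- characterisation of A: some value of the list has multiplicity = frequency
lemma portA_char (xs : List Int) (f : Int) :
    hasValuesFrequency xs f = xs.any (fun v => (xs.count v : Int) == f) := by
  rw [Bool.eq_iff_iff]
  simp only [hasValuesFrequency, List.any_eq_true, PySem.List.mem_pyRange_one]
  constructor
  · rintro ⟨i, ⟨h0, h1⟩, hc⟩
    rw [inner_eq_count xs i h0 h1] at hc
    obtain ⟨k, hk⟩ := Int.eq_ofNat_of_zero_le h0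
    subst hk
    have hk' : k < xs.length := by exact_mod_cast h1
    refine ⟨xs[k], List.getElem_mem hk', ?_⟩
    rwa [PySem.List.pyGetD_natCast, List.getD_eq_getElem xs 0 hk'] at hc
  · rintro ⟨v, hv, hc⟩
    obtain ⟨k, hk, hvk⟩ := List.getElem_of_mem hv
    refine ⟨(k : Int), ⟨by exact_mod_cast Nat.zero_le k, by exact_mod_cast hk⟩, ?_⟩
    rw [inner_eq_count xs (k : Int) (by exact_mod_cast Nat.zero_le k) (by exact_mod_cast hk),
        PySem.List.pyGetD_natCast, List.getD_eq_getElem xs 0 hk, hvk]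
    exact hc

-- characterisation of B: some distinct value has multiplicity = frequency
lemma portB_char (xs : List Int) (f : Int) :
    hasValuesFrequency_alt xs f = (PySem.Set.ofList xs).any (fun v => (xs.count v : Int) == f) := by
  show ((xs.foldl (fun d v => d.insert v (d.getD v 0 + 1)) PySem.Dict.empty).values.any
      (fun c => c == f)) = _
  rw [PySem.Dict.foldl_insert_getD_add_one_eq_counter]
  simp only [PySem.Dict.values, PySem.Dict.items_counter, List.map_map, List.any_map]
  rfl

-- ===== VERDICT (by name: the statement is the Claim_ definition above) =====
theorem hasValuesFrequency_spec : Claim_equal_hasValuesFrequency := by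
  intro xs f _
  unfold Spec_hasValuesFrequency
  rw [portA_char, portB_char, Bool.eq_iff_iff]
  simp only [List.any_eq_true, PySem.Set.mem_ofList]
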